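-- pv_equiv track=rewrite | github.com/hRun/TA_cryptosuite | bin/base62/base62.py | b62encode_int
-- ===== SOURCE A (Python) =====
-- ALPHABET = '0123456789ABCDEFGHIJKLMNOPQRSTUVWXYZabcdefghijklmnopqrstuvwxyz'
--
-- def b62encode_int(m):
--     c = []
--
--     while m > 0:
--         x   = m % 62
--         m //= 62
--         c.append(ALPHABET[x])
--
--     if len(c) > 0:
--         c.reverse()
--     else:
--         c.append(ALPHABET[0])
--
--     s = "".join(c)
--     return (ALPHABET[0] * max(1 - len(s), 0) + s)
-- ===== SOURCE B (Python) =====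
-- ALPHABET = '0123456789ABCDEFGHIJKLMNOPQRSTUVWXYZabcdefghijklmnopqrstuvwxyz'
--
-- def b62encode_int(m):
--     if m < 62:
--         return ALPHABET[0] if m <= 0 else ALPHABET[m]
--     return b62encode_int(m // 62) + ALPHABET[m % 62]
-- ===== Notes on version B (the rewrite author's own statement) =====
-- stated objective: simpler
-- what changed: Replaced the digit-collecting while loop with reverse-and-pad by a direct recursion that emits digits most-significant-first through the call stack, folding the nonpositive-input case and the redundant padding into the base case.
import Mathlib
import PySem

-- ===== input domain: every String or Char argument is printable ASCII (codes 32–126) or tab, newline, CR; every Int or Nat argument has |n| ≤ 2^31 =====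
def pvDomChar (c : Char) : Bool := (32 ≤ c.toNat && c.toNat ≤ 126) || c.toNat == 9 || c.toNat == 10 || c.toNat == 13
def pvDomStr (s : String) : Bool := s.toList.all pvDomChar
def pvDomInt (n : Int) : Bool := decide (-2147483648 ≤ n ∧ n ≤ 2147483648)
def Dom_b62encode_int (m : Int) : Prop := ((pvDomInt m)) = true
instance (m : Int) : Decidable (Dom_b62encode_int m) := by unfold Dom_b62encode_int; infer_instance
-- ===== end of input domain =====

-- B replaces A's collect/reverse/pad loop by a direct most-significant-first recursion (simpler decomposition).

-- ===== PORT A =====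
def pvAlpha : List Char := "0123456789ABCDEFGHIJKLMNOPQRSTUVWXYZabcdefghijklmnopqrstuvwxyz".toList

-- ALPHABET[i]; every index used is in range [0,62)
def pvAlphaGet (i : Int) : Char := PySem.List.pyGetD pvAlpha i '!'

-- the 'while m > 0' loop, accumulating least-significant digits
def b62loop (m : Int) (c : List Char) : List Char :=
  if _h : 0 < m then
    b62loop (PySem.Int.floordiv m 62) (c ++ [pvAlphaGet (PySem.Int.mod m 62)])
  else c
termination_by m.toNat
decreasing_by
  have h1 : PySem.Int.floordiv m 62 = m / 62 := PySem.Int.floordiv_eq_ediv_of_pos (by omega)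
  rw [h1]; omega

def b62encode_int (m : Int) : String :=
  let c0 := b62loop m []
  let c := if c0.length > 0 then c0.reverse else c0 ++ [pvAlphaGet 0]
  -- "".join and the string concat/pad are done on the char list, then packed with String.mk
  String.mk (List.replicate (max (1 - (c.length : Int)) 0).toNat (pvAlphaGet 0) ++ c)

-- ===== PORT B =====
-- B's recursion, char-list side (Python string concatenation = list append under String.mk)
def b62altChars (m : Int) : List Char :=
  if m < 62 then
    (if m ≤ 0 then [pvAlphaGet 0] else [pvAlphaGet m])
  else
    b62altChars (PySem.Int.floordiv m 62) ++ [pvAlphaGet (PySem.Int.mod m 62)]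
termination_by m.toNat
decreasing_by
  have h1 : PySem.Int.floordiv m 62 = m / 62 := PySem.Int.floordiv_eq_ediv_of_pos (by omega)
  rw [h1]; omega

def b62encode_int_alt (m : Int) : String := String.mk (b62altChars m)

-- ===== PRECONDITION & SPEC =====
def Spec_b62encode_int (m : Int) (out : String) : Prop := out = b62encode_int_alt m
instance (m : Int) (out : String) : Decidable (Spec_b62encode_int m out) := by unfold Spec_b62encode_int; infer_instance

-- ===== CLAIM (what is proved, stated in full; the proofs are below) =====
def Claim_equal_b62encode_int : Prop := ∀ (m : Int), Dom_b62encode_int m → Spec_b62encode_int m (b62encode_int m)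

-- ===== LEMMAS AND PROOFS =====

lemma b62altChars_ne_nil (m : Int) : b62altChars m ≠ [] := by
  rw [b62altChars]
  split_ifs <;> simp

lemma b62loop_eq_rev (n : Nat) : ∀ (m : Int) (c : List Char), m.toNat ≤ n → 0 < m →
    b62loop m c = c ++ (b62altChars m).reverse := by
  induction n with
  | zero => intro m c hle hpos; omega
  | succ n ih =>
    intro m c hle hpos
    have hfd : PySem.Int.floordiv m 62 = m / 62 := PySem.Int.floordiv_eq_ediv_of_pos (by omega)
    have hmod : PySem.Int.mod m 62 = m % 62 := PySem.Int.mod_eq_emod_of_pos (by omega)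
    rw [b62loop, dif_pos hpos]
    by_cases h62 : m < 62
    · have hq : m / 62 = 0 := by omega
      have hr : m % 62 = m := by omega
      rw [b62loop, dif_neg (by rw [hfd, hq]; omega)]
      rw [b62altChars, if_pos h62, if_neg (by omega)]
      simp [hr]
    · have hq : 0 < m / 62 := by omega
      have hq' : (m / 62).toNat ≤ n := by omega
      conv_rhs => rw [b62altChars]
      rw [if_neg h62, ih (PySem.Int.floordiv m 62) _ (by rw [hfd]; exact hq') (by rw [hfd]; exact hq)]
      simp

-- ===== VERDICT (by name: the statement is the Claim_ definition above) =====
theorem b62encode_int_spec : Claim_equal_b62encode_int := by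
  intro m _
  unfold Spec_b62encode_int b62encode_int b62encode_int_alt
  by_cases hpos : 0 < m
  · have h := b62loop_eq_rev m.toNat m [] le_rfl hpos
    simp only [h, List.nil_append, List.reverse_reverse]
    have hne := b62altChars_ne_nil m
    have hlen : 0 < (b62altChars m).length := List.length_pos_iff.mpr hne
    rw [if_pos (by simpa using hlen)]
    have : (max (1 - ((b62altChars m).length : Int)) 0).toNat = 0 := by omega
    rw [this]
    simp
  · rw [b62loop, dif_neg hpos]
    rw [b62altChars, if_pos (by omega), if_pos (by omega)]
    simp
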